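-- pv_equiv track=rewrite | github.com/ml4t/backtest | archive/obsolete/tests/fixtures/ml_signal_data.py | generate_regime_indicators
-- ===== SOURCE A (Python) =====
-- def generate_regime_indicators(
--     n_days: int,
--     regime_changes: list[int] | None = None,
--     initial_regime: str = "bull",
-- ) -> list[str]:
--     """Generate market regime indicators.
--
--     Args:
--         n_days: Number of days
--         regime_changes: List of days when regime changes
--         initial_regime: Starting regime ('bull' or 'bear')
--
--     Returns:
--         List of regime labels
--     """
--     if regime_changes is None:
--         regime_changes = []
--
--     regimes = []
--     current_regime = initial_regime
--
--     for i in range(n_days):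
--         # Check for regime change
--         if i in regime_changes:
--             current_regime = "bear" if current_regime == "bull" else "bull"
--         regimes.append(current_regime)
--
--     return regimes
-- ===== SOURCE B (Python) =====
-- def generate_regime_indicators(
--     n_days: int,
--     regime_changes: list[int] | None = None,
--     initial_regime: str = "bull",
-- ) -> list[str]:
--     """Build the label list run by run between sorted distinct change days."""
--     boundaries = sorted({d for d in (regime_changes or []) if 0 <= d < n_days})
--     out = []
--     cur = initial_regime
--     prev = 0
--     for b in boundaries:
--         out.extend([cur] * (b - prev))
--         cur = "bear" if cur == "bull" else "bull"
--         prev = b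
--     out.extend([cur] * (n_days - prev))
--     return out
-- ===== Notes on version B (the rewrite author's own statement) =====
-- stated objective: faster
-- what changed: Replaces the per-day loop with an O(i in list) membership test each day by building the sorted distinct in-range change days once and emitting each constant-label run in one extend.
import Mathlib
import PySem

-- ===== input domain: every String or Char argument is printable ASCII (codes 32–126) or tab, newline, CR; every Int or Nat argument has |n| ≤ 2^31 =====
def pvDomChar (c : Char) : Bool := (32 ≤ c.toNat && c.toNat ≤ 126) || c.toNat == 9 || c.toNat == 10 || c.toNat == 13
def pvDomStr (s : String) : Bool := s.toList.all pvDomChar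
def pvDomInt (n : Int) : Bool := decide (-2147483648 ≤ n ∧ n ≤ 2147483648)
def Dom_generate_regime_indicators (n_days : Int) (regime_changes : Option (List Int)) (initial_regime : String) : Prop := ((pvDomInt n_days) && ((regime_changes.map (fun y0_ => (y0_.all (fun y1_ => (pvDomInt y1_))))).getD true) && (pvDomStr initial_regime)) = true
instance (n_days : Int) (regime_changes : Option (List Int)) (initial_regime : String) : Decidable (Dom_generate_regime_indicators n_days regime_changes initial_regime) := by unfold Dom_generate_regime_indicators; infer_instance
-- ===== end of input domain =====

-- B builds the label list run by run between the sorted distinct in-range change days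
-- instead of testing list membership for every day (objective: faster).


-- ===== PORT A =====
-- Python's toggle expression: "bear" if current == "bull" else "bull"
def pvTog (s : String) : String := if s == "bull" then "bear" else "bull"

-- the for-loop of A: state (current_regime, regimes), one step per day
def pvALoop (changes : List Int) : List Int → String × List String → String × List String
  | [], st => st
  | i :: is, (cur, acc) =>
      let cur' := if changes.contains i then pvTog cur else cur
      pvALoop changes is (cur', acc ++ [cur'])

def generate_regime_indicators (n_days : Int) (regime_changes : Option (List Int)) (initial_regime : String) : List String :=
  let changes := regime_changes.getD []
  (pvALoop changes (PySem.List.pyRange 0 n_days 1) (initial_regime, [])).2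

-- ===== PORT B =====
-- emit the runs: for each boundary append (b - prev) copies of cur, flip; then the tail run
def pvSegs (n : Int) : List Int → Int → String → List String
  | [], prev, cur => List.replicate (n - prev).toNat cur
  | b :: rest, prev, cur => List.replicate (b - prev).toNat cur ++ pvSegs n rest b (pvTog cur)

def generate_regime_indicators_alt (n_days : Int) (regime_changes : Option (List Int)) (initial_regime : String) : List String :=
  let boundaries := PySem.List.sorted
      (PySem.Set.ofList ((regime_changes.getD []).filter (fun d => decide (0 ≤ d) && decide (d < n_days))))
      (fun x => x) false
  pvSegs n_days boundaries 0 initial_regime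

-- ===== PRECONDITION & SPEC =====
def Spec_generate_regime_indicators (n_days : Int) (regime_changes : Option (List Int)) (initial_regime : String) (out : List String) : Prop := out = generate_regime_indicators_alt n_days regime_changes initial_regime
instance (n_days : Int) (regime_changes : Option (List Int)) (initial_regime : String) (out : List String) : Decidable (Spec_generate_regime_indicators n_days regime_changes initial_regime out) := by unfold Spec_generate_regime_indicators; infer_instance

-- ===== CLAIM (what is proved, stated in full; the proofs are below) =====
def Claim_equal_generate_regime_indicators : Prop := ∀ (n_days : Int) (regime_changes : Option (List Int)) (initial_regime : String), Dom_generate_regime_indicators n_days regime_changes initial_regime → Spec_generate_regime_indicators n_days regime_changes initial_regime (generate_regime_indicators n_days regime_changes initial_regime)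

-- ===== LEMMAS AND PROOFS =====

-- accumulator-free form of A's loop
def pvALoopP (changes : List Int) : List Int → String → List String
  | [], _ => []
  | i :: is, cur =>
      let c := if changes.contains i then pvTog cur else cur
      c :: pvALoopP changes is c

theorem pvALoop_acc (changes : List Int) : ∀ (is : List Int) (cur : String) (acc : List String),
    (pvALoop changes is (cur, acc)).2 = acc ++ pvALoopP changes is cur := by
  intro is
  induction is with
  | nil => intro cur acc; simp [pvALoop, pvALoopP]
  | cons i is ih =>
      intro cur acc
      simp only [pvALoop, pvALoopP, ih]
      simp

theorem pvALoopP_congr (c1 c2 : List Int) : ∀ (is : List Int) (cur : String),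
    (∀ i ∈ is, (i ∈ c1 ↔ i ∈ c2)) → pvALoopP c1 is cur = pvALoopP c2 is cur := by
  intro is
  induction is with
  | nil => intro cur _; rfl
  | cons i is ih =>
      intro cur h
      have hi : (i ∈ c1 ↔ i ∈ c2) := h i (by simp)
      have hc : c1.contains i = c2.contains i := by
        simp only [List.contains_eq_mem]
        exact decide_eq_decide.mpr hi
      simp only [pvALoopP, hc]
      exact congrArg _ (ih _ (fun j hj => h j (by simp [hj])))

theorem pvSegs_shift_nil (n prev : Int) (cur : String) (h : prev < n) :
    pvSegs n [] prev cur = cur :: pvSegs n [] (prev + 1) cur := by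
  simp only [pvSegs]
  have : (n - prev).toNat = (n - (prev + 1)).toNat + 1 := by omega
  rw [this, List.replicate_succ]

theorem pvSegs_shift_cons (n b prev : Int) (rest : List Int) (cur : String) (h : prev < b) :
    pvSegs n (b :: rest) prev cur = cur :: pvSegs n (b :: rest) (prev + 1) cur := by
  simp only [pvSegs]
  have : (b - prev).toNat = (b - (prev + 1)).toNat + 1 := by omega
  rw [this, List.replicate_succ]
  rfl

theorem pvMain (n : Int) : ∀ (bs : List Int) (prev : Int) (cur : String),
    bs.Pairwise (· < ·) → (∀ b ∈ bs, prev ≤ b ∧ b < n) →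
    pvALoopP bs (PySem.List.pyRange prev n 1) cur = pvSegs n bs prev cur := by
  intro bs prev cur hs hb
  by_cases hn : n ≤ prev
  · -- empty range; bs must be empty too
    rw [PySem.List.pyRange_one_eq_nil hn]
    cases bs with
    | nil =>
        simp [pvALoopP, pvSegs, Int.toNat_of_nonpos (by omega : n - prev ≤ 0)]
    | cons b rest =>
        exact absurd (hb b (by simp)) (by omega)
  · rw [not_le] at hn
    rw [PySem.List.pyRange_one_cons hn]
    cases bs with
    | nil =>
        have hc : ([] : List Int).contains prev = false := rfl
        simp only [pvALoopP, hc, Bool.false_eq_true, if_false]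
        rw [pvMain n [] (prev + 1) cur (by simp) (by simp), pvSegs_shift_nil n prev cur hn]
    | cons b rest =>
        have hpb : prev ≤ b := (hb b (by simp)).1
        have hbn : b < n := (hb b (by simp)).2
        have hrest : ∀ r ∈ rest, b < r := by
          intro r hr; exact (List.pairwise_cons.mp hs).1 r hr
        by_cases heq : prev = b
        · -- change day: toggle
          rw [heq]
          have hc : (b :: rest).contains b = true := by simp
          simp only [pvALoopP, hc, if_true]
          have hcong : pvALoopP (b :: rest) (PySem.List.pyRange (b + 1) n 1) (pvTog cur)
              = pvALoopP rest (PySem.List.pyRange (b + 1) n 1) (pvTog cur) := by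
            apply pvALoopP_congr
            intro i hi
            have hi' := (PySem.List.mem_pyRange_one).mp hi
            constructor
            · intro hm
              rcases List.mem_cons.mp hm with h1 | h1
              · omega
              · exact h1
            · intro hm; exact List.mem_cons_of_mem _ hm
          rw [hcong, pvMain n rest (b + 1) (pvTog cur)
                (List.pairwise_cons.mp hs).2
                (fun r hr => ⟨by have := hrest r hr; omega, (hb r (List.mem_cons_of_mem _ hr)).2⟩)]
          show pvTog cur :: pvSegs n rest (b + 1) (pvTog cur) = pvSegs n (b :: rest) b cur
          cases rest with
          | nil =>
              simp only [pvSegs]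
              have h0 : (b - b).toNat = 0 := by omega
              have h1 : (n - b).toNat = (n - (b + 1)).toNat + 1 := by omega
              rw [h0, h1, List.replicate_succ]
              simp
          | cons b1 r1 =>
              have hb1 : b < b1 := hrest b1 (by simp)
              simp only [pvSegs]
              have h0 : (b - b).toNat = 0 := by omega
              have h1 : (b1 - b).toNat = (b1 - (b + 1)).toNat + 1 := by omega
              rw [h0, h1, List.replicate_succ]
              simp
        · -- plain day before the next boundary
          have hlt : prev < b := by omega
          have hc : (b :: rest).contains prev = false := by
            simp only [List.contains_eq_mem, decide_eq_false_iff_not]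
            intro hm
            rcases List.mem_cons.mp hm with h1 | h1
            · omega
            · have := hrest prev h1; omega
          simp only [pvALoopP, hc, Bool.false_eq_true, if_false]
          rw [pvMain n (b :: rest) (prev + 1) cur hs
                (fun r hr => by
                  rcases List.mem_cons.mp hr with h1 | h1
                  · subst h1; exact ⟨by omega, hbn⟩
                  · have := hrest r h1
                    exact ⟨by omega, (hb r hr).2⟩)]
          exact (pvSegs_shift_cons n b prev rest cur hlt).symm
termination_by _bs prev _ => (n - prev).toNat
decreasing_by all_goals omega

-- ===== VERDICT (by name: the statement is the Claim_ definition above) =====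
theorem generate_regime_indicators_spec : Claim_equal_generate_regime_indicators := by
  intro n rc init _
  show generate_regime_indicators n rc init = generate_regime_indicators_alt n rc init
  unfold generate_regime_indicators generate_regime_indicators_alt
  set changes := rc.getD [] with hch
  set bs := PySem.List.sorted
      (PySem.Set.ofList (changes.filter (fun d => decide (0 ≤ d) && decide (d < n))))
      (fun x => x) false with hbs
  have hmem : ∀ i : Int, i ∈ bs ↔ (i ∈ changes ∧ 0 ≤ i ∧ i < n) := by
    intro i
    rw [hbs, PySem.List.mem_sorted, PySem.Set.mem_ofList, List.mem_filter]
    simp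
  have hpair : bs.Pairwise (· < ·) := by
    rw [hbs]; exact PySem.List.sorted_ofList_pairwise_lt _
  rw [pvALoop_acc, List.nil_append]
  have hcong : pvALoopP changes (PySem.List.pyRange 0 n 1) init
      = pvALoopP bs (PySem.List.pyRange 0 n 1) init := by
    apply pvALoopP_congr
    intro i hi
    have hi' := (PySem.List.mem_pyRange_one).mp hi
    rw [hmem i]
    constructor
    · intro h; exact ⟨h, hi'.1, hi'.2⟩
    · intro h; exact h.1
  rw [hcong]
  exact pvMain n bs 0 init hpair (fun b hb => by have := (hmem b).mp hb; exact ⟨this.2.1, this.2.2⟩)
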